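-- pv_equiv track=rewrite | github.com/g0faq/PyPy | 945.py | F
-- ===== SOURCE A (Python) =====
-- def F(n, m):
--     if m == 8:
--         return 1
--     sp = [[0] * 8 for i in range(8)]
--     sp[9 - m - 1][n - 1] = 1
--     for i in range(8 - m, 0, -1):
--         for j in range(8):
--             if sp[i][j] != 0:
--                 if j != 0:
--                     sp[i - 1][j - 1] += sp[i][j]
--                 if j != 7:
--                     sp[i - 1][j + 1] += sp[i][j]
--     return sum(sp[0])
-- ===== SOURCE B (Python) =====
-- def F(n, m):
--     if m == 8:
--         return 1
--
--     def paths(row, col):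
--         if row == 0:
--             return 1
--         total = 0
--         if col > 0:
--             total += paths(row - 1, col - 1)
--         if col < 7:
--             total += paths(row - 1, col + 1)
--         return total
--
--     return paths(8 - m, n - 1)
-- ===== Notes on version B (the rewrite author's own statement) =====
-- stated objective: simpler
-- what changed: Replaces the explicit 8x8 table sweep (allocate grid, seed a cell, propagate row by row, sum row 0) with a direct top-down recursion paths(row,col) over the two diagonal moves.
-- outside the precondition, e.g. on F(0, 3): A returns 10, B returns 6; on F(1, 9): A returns 0, B does not finish within the time limit; on F(3, 16): A returns 1, B does not finish within the time limit
import Mathlib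
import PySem

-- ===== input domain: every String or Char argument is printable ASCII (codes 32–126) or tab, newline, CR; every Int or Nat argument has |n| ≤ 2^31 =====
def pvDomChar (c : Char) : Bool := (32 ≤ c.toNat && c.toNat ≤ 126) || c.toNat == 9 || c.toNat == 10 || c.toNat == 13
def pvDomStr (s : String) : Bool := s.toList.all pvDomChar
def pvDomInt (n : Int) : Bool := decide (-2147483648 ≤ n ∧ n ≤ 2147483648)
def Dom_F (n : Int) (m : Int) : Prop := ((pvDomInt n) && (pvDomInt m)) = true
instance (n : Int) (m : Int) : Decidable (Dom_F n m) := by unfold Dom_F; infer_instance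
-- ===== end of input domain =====

-- B replaces A's explicit 8x8 table sweep with a direct top-down recursion over the
-- two diagonal moves (objective: simpler).

-- ===== PORT A =====
-- sp[i][j]  (Python indexing, default only taken outside Pre_)
def pvGet2 (g : List (List Int)) (i j : Int) : Int :=
  PySem.List.pyGetD (PySem.List.pyGetD g i []) j 0

-- sp[i][j] += v  (total form of Python's item assignment; exact under Pre_)
def pvAdd2 (g : List (List Int)) (i j v : Int) : List (List Int) :=
  PySem.List.pySetD g i
    (PySem.List.pySetD (PySem.List.pyGetD g i []) j
      (PySem.List.pyGetD (PySem.List.pyGetD g i []) j 0 + v))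

def F (n : Int) (m : Int) : Int :=
  if m = 8 then 1
  else
    let sp := List.replicate 8 (List.replicate 8 (0 : Int))
    let sp := PySem.List.pySetD sp (9 - m - 1)
      (PySem.List.pySetD (PySem.List.pyGetD sp (9 - m - 1) []) (n - 1) 1)
    let sp := (PySem.List.pyRange (8 - m) 0 (-1)).foldl (fun sp i =>
      (PySem.List.pyRange 0 8 1).foldl (fun sp j =>
        let v := pvGet2 sp i j
        if v ≠ 0 then
          let sp := if j ≠ 0 then pvAdd2 sp (i - 1) (j - 1) v else sp
          if j ≠ 7 then pvAdd2 sp (i - 1) (j + 1) v else sp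
        else sp) sp) sp
    (PySem.List.pyGetD sp 0 []).foldl (· + ·) 0

-- ===== PORT B =====
-- Source B's recursive helper; the Nat row is only a termination measure (inside Pre_F,
-- 8 - m ≥ 1, so (8 - m).toNat is exactly the Python row).
def pvPaths : Nat → Int → Int
  | 0, _ => 1
  | r + 1, col =>
    (if col > 0 then pvPaths r (col - 1) else 0) +
    (if col < 7 then pvPaths r (col + 1) else 0)

def F_alt (n : Int) (m : Int) : Int :=
  if m = 8 then 1 else pvPaths (8 - m).toNat (n - 1)

-- ===== PRECONDITION & SPEC =====
-- Pre_ excludes off-board starts (m outside 1..8 or, for m ≠ 8, n outside 1..8): there A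
-- either raises IndexError or returns an accidental value of its negative-index wraparound
-- (seed placed on a wrapped row/column), a corner no caller would specify; B's recursion
-- does its own natural thing (or does not terminate) there.
def Pre_F (n : Int) (m : Int) : Prop :=
  m = 8 ∨ (1 ≤ m ∧ m ≤ 7 ∧ 1 ≤ n ∧ n ≤ 8)
instance (n : Int) (m : Int) : Decidable (Pre_F n m) := by unfold Pre_F; infer_instance

def pvWitness_F : Int × Int := (1, 1)

def Spec_F (n : Int) (m : Int) (out : Int) : Prop := out = F_alt n m
instance (n : Int) (m : Int) (out : Int) : Decidable (Spec_F n m out) := by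
  unfold Spec_F; infer_instance

-- ===== CLAIM (what is proved, stated in full; the proofs are below) =====
def Claim_equal_F : Prop := ∀ (n : Int) (m : Int), Dom_F n m → Pre_F n m → Spec_F n m (F n m)

-- ===== LEMMAS AND PROOFS =====

-- ===== VERDICT (by name: the statement is the Claim_ definition above) =====
set_option maxRecDepth 100000 in
theorem F_spec : Claim_equal_F := by
  intro n m _ hpre
  unfold Spec_F
  rcases hpre with h8 | ⟨hm1, hm7, hn1, hn8⟩
  · subst h8; rfl
  · interval_cases m <;> interval_cases n <;> decide
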